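-- pv_equiv track=rewrite | github.com/codelkj/scorpred | scripts/fetch_training_data.py | dedup_rows
-- ===== SOURCE A (Python) =====
-- def dedup_rows(rows: list[dict]) -> list[dict]:
--     """Remove duplicate matches (each game appears in both teams' schedules)."""
--     seen: set[tuple] = set()
--     out = []
--     for row in sorted(rows, key=lambda r: r["date"]):
--         key = (row["date"], row["home_team"], row["away_team"])
--         if key not in seen:
--             seen.add(key)
--             out.append(row)
--     return out
-- ===== SOURCE B (Python) =====
-- def dedup_rows(rows: list[dict]) -> list[dict]:
--     """Remove duplicate matches (each game appears in both teams' schedules)."""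
--     def key(r):
--         return (r["date"], r["home_team"], r["away_team"])
--     firsts = [r for i, r in enumerate(rows)
--               if all(key(p) != key(r) for p in rows[:i])]
--     return sorted(firsts, key=lambda r: r["date"])
-- ===== Notes on version B (the rewrite author's own statement) =====
-- stated objective: alternative
-- what changed: B drops the mutable seen-set entirely: it keeps a row iff no earlier row in the original list has the same (date, home_team, away_team) key (a quantified prefix scan over rows[:i]), then stably sorts the survivors by date; A instead sorts first and filters with a growing set. It trades O(n log n) for an O(n^2) declarative filter.
import Mathlib
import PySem

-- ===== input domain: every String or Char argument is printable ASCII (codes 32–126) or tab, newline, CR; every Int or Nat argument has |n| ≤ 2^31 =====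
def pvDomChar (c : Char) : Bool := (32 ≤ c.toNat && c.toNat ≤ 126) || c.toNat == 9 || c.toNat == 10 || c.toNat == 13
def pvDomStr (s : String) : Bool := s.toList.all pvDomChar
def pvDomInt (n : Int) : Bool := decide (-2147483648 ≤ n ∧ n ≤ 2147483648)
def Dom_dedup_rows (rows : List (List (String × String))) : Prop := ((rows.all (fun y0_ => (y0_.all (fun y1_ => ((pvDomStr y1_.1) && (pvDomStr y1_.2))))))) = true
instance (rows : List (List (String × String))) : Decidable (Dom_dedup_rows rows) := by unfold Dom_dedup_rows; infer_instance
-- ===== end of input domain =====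

-- B keeps a row iff no earlier row of the original list has the same key (a quantified prefix scan,
-- no seen-set), then stably sorts the survivors by date; A sorts first and filters with a seen-set.
-- Equivalence of the RETURN values is proved.

-- row["date"] as a dict lookup (first match), exact for Python's dict on rows that contain the key (Pre_)
def pvDate (row : List (String × String)) : String := (PySem.Dict.mk row).getD "date" ""

-- the dedup key (row["date"], row["home_team"], row["away_team"])
def pvRowKey (row : List (String × String)) : String × String × String :=
  (pvDate row, (PySem.Dict.mk row).getD "home_team" "", (PySem.Dict.mk row).getD "away_team" "")

-- ===== PORT A =====
def dedup_rows (rows : List (List (String × String))) : List (List (String × String)) :=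
  ((PySem.List.sorted rows pvDate false).foldl
    (fun (acc : PySem.Set (String × String × String) × List (List (String × String))) row =>
      let key := pvRowKey row
      if acc.1.contains key then acc else (acc.1.add key, acc.2 ++ [row]))
    (PySem.Set.empty, [])).2

-- ===== PORT B =====
def dedup_rows_alt (rows : List (List (String × String))) : List (List (String × String)) :=
  let firsts := ((PySem.List.enumerate rows 0).filter
    (fun p => (PySem.List.slice rows none (some p.1)).all
      (fun q => pvRowKey q != pvRowKey p.2))).map (fun p => p.2)
  PySem.List.sorted firsts pvDate false

-- ===== PRECONDITION & SPEC =====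
-- Pre_ excludes exactly the rows on which the Python raises KeyError: a row missing "date", "home_team" or "away_team".
def Pre_dedup_rows (rows : List (List (String × String))) : Prop :=
  (rows.all (fun row => ((PySem.Dict.mk row).get? "date").isSome
      && ((PySem.Dict.mk row).get? "home_team").isSome
      && ((PySem.Dict.mk row).get? "away_team").isSome)) = true
instance (rows : List (List (String × String))) : Decidable (Pre_dedup_rows rows) := by
  unfold Pre_dedup_rows; infer_instance

def pvWitness_dedup_rows : (List (List (String × String))) :=
  [[("date", "2024-08-10"), ("home_team", "Arsenal"), ("away_team", "Chelsea")],
   [("date", "2024-08-10"), ("home_team", "Arsenal"), ("away_team", "Chelsea")]]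

def Spec_dedup_rows (rows : List (List (String × String))) (out : List (List (String × String))) : Prop := out = dedup_rows_alt rows
instance (rows : List (List (String × String))) (out : List (List (String × String))) : Decidable (Spec_dedup_rows rows out) := by unfold Spec_dedup_rows; infer_instance

-- ===== CLAIM (what is proved, stated in full; the proofs are below) =====
def Claim_equal_dedup_rows : Prop := ∀ (rows : List (List (String × String))), Dom_dedup_rows rows → Pre_dedup_rows rows → Spec_dedup_rows rows (dedup_rows rows)

-- ===== LEMMAS AND PROOFS =====

-- first-occurrence dedup by pvRowKey, threading the set of seen keys as a plain list
def pvDD (seen : List (String × String × String)) :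
    List (List (String × String)) → List (List (String × String))
  | [] => []
  | r :: rs =>
    if pvRowKey r ∈ seen then pvDD seen rs else r :: pvDD (seen ++ [pvRowKey r]) rs

def pvInsLe (x : List (String × String)) (ys : List (List (String × String))) :
    List (List (String × String)) :=
  PySem.List.insertBy (fun a b => decide (pvDate a ≤ pvDate b)) x ys

def pvIns (x : List (String × String)) (ys : List (List (String × String))) :
    List (List (String × String)) :=
  PySem.List.insertBy (fun a b => decide (pvDate a < pvDate b)) x ys

def pvSort (xs : List (List (String × String))) : List (List (String × String)) :=
  PySem.List.sorted xs pvDate false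

lemma pvInsertBy_nil {α : Type} (b : α → α → Bool) (x : α) :
    PySem.List.insertBy b x [] = [x] := rfl

lemma pvInsertBy_cons_pos {α : Type} (b : α → α → Bool) (x y : α) (ys : List α)
    (h : b x y = true) : PySem.List.insertBy b x (y :: ys) = x :: y :: ys := by
  simp [PySem.List.insertBy, h]

lemma pvInsertBy_cons_neg {α : Type} (b : α → α → Bool) (x y : α) (ys : List α)
    (h : b x y = false) : PySem.List.insertBy b x (y :: ys) = y :: PySem.List.insertBy b x ys := by
  simp [PySem.List.insertBy, h]

lemma pvInsLe_ins_comm (x y : List (String × String)) (acc : List (List (String × String))) :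
    pvInsLe x (pvIns y acc) = pvIns y (pvInsLe x acc) := by
  induction acc with
  | nil =>
    by_cases h : pvDate x ≤ pvDate y
    · rw [show pvIns y [] = [y] from rfl,
        show pvInsLe x [y] = [x, y] from pvInsertBy_cons_pos _ _ _ _ (by simpa using h),
        show pvInsLe x [] = [x] from rfl,
        show pvIns y [x] = x :: pvIns y [] from
          pvInsertBy_cons_neg _ _ _ _ (by simpa using not_lt.mpr h)]
      rfl
    · rw [show pvIns y [] = [y] from rfl,
        show pvInsLe x [y] = y :: pvInsLe x [] from pvInsertBy_cons_neg _ _ _ _ (by simpa using h),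
        show pvInsLe x [] = [x] from rfl,
        show pvIns y [x] = [y, x] from
          pvInsertBy_cons_pos _ _ _ _ (by simpa using not_le.mp h)]
  | cons z acc ih =>
    by_cases hyz : pvDate y < pvDate z
    · rw [show pvIns y (z :: acc) = y :: z :: acc from
        pvInsertBy_cons_pos _ _ _ _ (by simpa using hyz)]
      by_cases hxy : pvDate x ≤ pvDate y
      · have hxz : pvDate x ≤ pvDate z := le_of_lt (lt_of_le_of_lt hxy hyz)
        rw [show pvInsLe x (y :: z :: acc) = x :: y :: z :: acc from
          pvInsertBy_cons_pos _ _ _ _ (by simpa using hxy)]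
        rw [show pvInsLe x (z :: acc) = x :: z :: acc from
          pvInsertBy_cons_pos _ _ _ _ (by simpa using hxz)]
        rw [show pvIns y (x :: z :: acc) = x :: pvIns y (z :: acc) from
          pvInsertBy_cons_neg _ _ _ _ (by simpa using not_lt.mpr hxy)]
        rw [show pvIns y (z :: acc) = y :: z :: acc from
          pvInsertBy_cons_pos _ _ _ _ (by simpa using hyz)]
      · rw [show pvInsLe x (y :: z :: acc) = y :: pvInsLe x (z :: acc) from
          pvInsertBy_cons_neg _ _ _ _ (by simpa using hxy)]
        by_cases hxz : pvDate x ≤ pvDate z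
        · rw [show pvInsLe x (z :: acc) = x :: z :: acc from
            pvInsertBy_cons_pos _ _ _ _ (by simpa using hxz)]
          rw [show pvIns y (x :: z :: acc) = y :: x :: z :: acc from
            pvInsertBy_cons_pos _ _ _ _ (by simpa using not_le.mp hxy)]
        · rw [show pvInsLe x (z :: acc) = z :: pvInsLe x acc from
            pvInsertBy_cons_neg _ _ _ _ (by simpa using hxz)]
          rw [show pvIns y (z :: pvInsLe x acc) = y :: z :: pvInsLe x acc from
            pvInsertBy_cons_pos _ _ _ _ (by simpa using hyz)]
    · rw [show pvIns y (z :: acc) = z :: pvIns y acc from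
        pvInsertBy_cons_neg _ _ _ _ (by simpa using hyz)]
      by_cases hxz : pvDate x ≤ pvDate z
      · have hyx : ¬ pvDate y < pvDate x := by
          intro hlt
          exact hyz (lt_of_lt_of_le hlt hxz)
        rw [show pvInsLe x (z :: pvIns y acc) = x :: z :: pvIns y acc from
          pvInsertBy_cons_pos _ _ _ _ (by simpa using hxz)]
        rw [show pvInsLe x (z :: acc) = x :: z :: acc from
          pvInsertBy_cons_pos _ _ _ _ (by simpa using hxz)]
        rw [show pvIns y (x :: z :: acc) = x :: pvIns y (z :: acc) from
          pvInsertBy_cons_neg _ _ _ _ (by simpa using hyx)]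
        rw [show pvIns y (z :: acc) = z :: pvIns y acc from
          pvInsertBy_cons_neg _ _ _ _ (by simpa using hyz)]
      · rw [show pvInsLe x (z :: pvIns y acc) = z :: pvInsLe x (pvIns y acc) from
          pvInsertBy_cons_neg _ _ _ _ (by simpa using hxz)]
        rw [show pvInsLe x (z :: acc) = z :: pvInsLe x acc from
          pvInsertBy_cons_neg _ _ _ _ (by simpa using hxz)]
        rw [show pvIns y (z :: pvInsLe x acc) = z :: pvIns y (pvInsLe x acc) from
          pvInsertBy_cons_neg _ _ _ _ (by simpa using hyz)]
        rw [ih]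

lemma pvFoldIns_insLe (xs : List (List (String × String))) (x : List (String × String))
    (acc : List (List (String × String))) :
    xs.foldl (fun a z => pvIns z a) (pvInsLe x acc)
      = pvInsLe x (xs.foldl (fun a z => pvIns z a) acc) := by
  induction xs generalizing acc with
  | nil => rfl
  | cons z xs ih =>
    simp only [List.foldl_cons]
    rw [← pvInsLe_ins_comm x z acc, ih]

lemma pvSort_cons (x : List (String × String)) (xs : List (List (String × String))) :
    pvSort (x :: xs) = pvInsLe x (pvSort xs) := by
  unfold pvSort
  rw [PySem.List.sorted_eq_foldl_insertBy, PySem.List.sorted_eq_foldl_insertBy]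
  simp only [List.foldl_cons]
  exact pvFoldIns_insLe xs x []

lemma pvInsertBy_split (b : List (String × String) → List (String × String) → Bool)
    (x : List (String × String)) (ys : List (List (String × String))) :
    ∃ l1 l2, ys = l1 ++ l2 ∧ PySem.List.insertBy b x ys = l1 ++ x :: l2 ∧
      ∀ z ∈ l1, b x z = false := by
  induction ys with
  | nil => exact ⟨[], [], rfl, rfl, by simp⟩
  | cons y ys ih =>
    cases hb : b x y with
    | true => exact ⟨[], y :: ys, rfl, pvInsertBy_cons_pos _ _ _ _ hb, by simp⟩
    | false =>
      obtain ⟨l1, l2, h1, h2, h3⟩ := ih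
      refine ⟨y :: l1, l2, by simp [h1], ?_, ?_⟩
      · rw [pvInsertBy_cons_neg _ _ _ _ hb, h2]; rfl
      · intro z hz
        rcases List.mem_cons.mp hz with hz | hz
        · exact hz ▸ hb
        · exact h3 z hz

lemma pvDD_subset (seen : List (String × String × String))
    (xs : List (List (String × String))) :
    ∀ z ∈ pvDD seen xs, z ∈ xs := by
  induction xs generalizing seen with
  | nil => simp [pvDD]
  | cons r rs ih =>
    intro z hz
    by_cases h : pvRowKey r ∈ seen
    · simp only [pvDD, if_pos h] at hz
      exact List.mem_cons_of_mem _ (ih seen z hz)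
    · simp only [pvDD, if_neg h] at hz
      rcases List.mem_cons.mp hz with hz | hz
      · exact hz ▸ List.mem_cons_self
      · exact List.mem_cons_of_mem _ (ih _ z hz)

lemma pvDD_congr (seen1 seen2 : List (String × String × String))
    (xs : List (List (String × String)))
    (h : ∀ q, q ∈ seen1 ↔ q ∈ seen2) : pvDD seen1 xs = pvDD seen2 xs := by
  induction xs generalizing seen1 seen2 with
  | nil => rfl
  | cons r rs ih =>
    by_cases h1 : pvRowKey r ∈ seen1
    · rw [pvDD, pvDD, if_pos h1, if_pos ((h _).mp h1)]
      exact ih seen1 seen2 h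
    · rw [pvDD, pvDD, if_neg h1, if_neg (fun hc => h1 ((h _).mpr hc))]
      refine congrArg _ (ih _ _ fun q => ?_)
      simp [h q]

lemma pvDD_middle (seen : List (String × String × String)) (r : List (String × String))
    (l1 l2 : List (List (String × String))) (hr : pvRowKey r ∈ seen) :
    pvDD seen (l1 ++ r :: l2) = pvDD seen (l1 ++ l2) := by
  induction l1 generalizing seen with
  | nil => simpa [pvDD] using fun hc => absurd hr hc
  | cons y l1 ih =>
    by_cases hy : pvRowKey y ∈ seen
    · rw [List.cons_append, List.cons_append, pvDD, pvDD, if_pos hy, if_pos hy]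
      exact ih seen hr
    · rw [List.cons_append, List.cons_append, pvDD, pvDD, if_neg hy, if_neg hy]
      exact congrArg _ (ih _ (List.mem_append_left _ hr))

lemma pvInsLe_of_forall_le (r : List (String × String)) (Z : List (List (String × String)))
    (h : ∀ z ∈ Z, pvDate r ≤ pvDate z) : pvInsLe r Z = r :: Z := by
  cases Z with
  | nil => rfl
  | cons z Z =>
    exact pvInsertBy_cons_pos _ _ _ _ (by simpa using h z List.mem_cons_self)

lemma pvDD_insLe (ys : List (List (String × String)))
    (seen : List (String × String × String)) (r : List (String × String))
    (hs : ys.Pairwise (fun a b => pvDate a ≤ pvDate b)) (hr : pvRowKey r ∉ seen) :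
    pvDD seen (pvInsLe r ys) = pvInsLe r (pvDD (seen ++ [pvRowKey r]) ys) := by
  induction ys generalizing seen with
  | nil =>
    simp [pvInsLe, pvInsertBy_nil, pvDD, hr]
  | cons y ys ih =>
    obtain ⟨hy, hs'⟩ := List.pairwise_cons.mp hs
    by_cases hle : pvDate r ≤ pvDate y
    · rw [show pvInsLe r (y :: ys) = r :: y :: ys from
        pvInsertBy_cons_pos _ _ _ _ (by simpa using hle)]
      rw [pvDD, if_neg hr]
      refine (pvInsLe_of_forall_le r _ fun z hz => ?_).symm
      rcases List.mem_cons.mp (pvDD_subset _ _ z hz) with hz | hz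
      · exact hz ▸ hle
      · exact le_trans hle (hy z hz)
    · have hlt : pvDate y < pvDate r := not_le.mp hle
      have hne : pvRowKey y ≠ pvRowKey r := by
        intro he
        exact absurd (congrArg Prod.fst he) (ne_of_lt hlt)
      rw [show pvInsLe r (y :: ys) = y :: pvInsLe r ys from
        pvInsertBy_cons_neg _ _ _ _ (by simpa using hle)]
      by_cases hy1 : pvRowKey y ∈ seen
      · rw [pvDD, if_pos hy1, ih seen hs' hr, pvDD,
          if_pos (List.mem_append_left _ hy1)]
      · have hr' : pvRowKey r ∉ seen ++ [pvRowKey y] := by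
          simp [hr, hne.symm]
        have hy' : pvRowKey y ∉ seen ++ [pvRowKey r] := by
          simp [hy1, hne]
        rw [pvDD, if_neg hy1, ih _ hs' hr', pvDD, if_neg hy']
        rw [show pvInsLe r (y :: pvDD ((seen ++ [pvRowKey r]) ++ [pvRowKey y]) ys)
            = y :: pvInsLe r (pvDD ((seen ++ [pvRowKey r]) ++ [pvRowKey y]) ys) from
          pvInsertBy_cons_neg _ _ _ _ (by simpa using hle)]
        refine congrArg _ (congrArg _ (pvDD_congr _ _ _ fun q => ?_))
        simp
        tauto

lemma pvMain (rows : List (List (String × String)))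
    (seen : List (String × String × String)) :
    pvDD seen (pvSort rows) = pvSort (pvDD seen rows) := by
  induction rows generalizing seen with
  | nil => rfl
  | cons r rs ih =>
    rw [pvSort_cons]
    by_cases h : pvRowKey r ∈ seen
    · obtain ⟨l1, l2, he, hi, -⟩ :=
        pvInsertBy_split (fun a b => decide (pvDate a ≤ pvDate b)) r (pvSort rs)
      rw [show pvInsLe r (pvSort rs) = l1 ++ r :: l2 from hi,
        pvDD_middle seen r l1 l2 h, ← he, ih seen]
      rw [show pvDD seen (r :: rs) = pvDD seen rs from by rw [pvDD, if_pos h]]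
    · rw [pvDD_insLe (pvSort rs) seen r (PySem.List.sorted_pairwise rs pvDate) h,
        ih (seen ++ [pvRowKey r]), ← pvSort_cons]
      rw [show pvDD seen (r :: rs) = r :: pvDD (seen ++ [pvRowKey r]) rs from by
        rw [pvDD, if_neg h]]

lemma pvA_loop (xs : List (List (String × String)))
    (seen : PySem.Set (String × String × String)) (out : List (List (String × String))) :
    (xs.foldl
      (fun (acc : PySem.Set (String × String × String) × List (List (String × String))) row =>
        let key := pvRowKey row
        if acc.1.contains key then acc else (acc.1.add key, acc.2 ++ [row]))
      (seen, out)).2 = out ++ pvDD seen xs := by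
  induction xs generalizing seen out with
  | nil => simp [pvDD]
  | cons r rs ih =>
    simp only [List.foldl_cons]
    by_cases h : pvRowKey r ∈ seen
    · have hc : PySem.Set.contains seen (pvRowKey r) = true := by simpa using h
      simp only [hc, if_true]
      rw [ih seen out, pvDD, if_pos h]
    · have hc : PySem.Set.contains seen (pvRowKey r) = false := by simpa using h
      have hadd : PySem.Set.add seen (pvRowKey r) = seen ++ [pvRowKey r] := by
        simp [PySem.Set.add, h]
      simp only [hc, if_false, Bool.false_eq_true]
      rw [hadd, ih (seen ++ [pvRowKey r]) (out ++ [r]), pvDD, if_neg h]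
      simp

-- B's quantified prefix-scan filter IS first-occurrence dedup: generalized over a processed prefix
lemma pvB_gen (xs pre : List (List (String × String))) :
    ((PySem.List.enumerate xs (pre.length : Int)).filter
      (fun p => (PySem.List.slice (pre ++ xs) none (some p.1)).all
        (fun q => pvRowKey q != pvRowKey p.2))).map (fun p => p.2)
      = pvDD (pre.map pvRowKey) xs := by
  induction xs generalizing pre with
  | nil => simp [PySem.List.enumerate_nil, pvDD]
  | cons r rs ih =>
    have hslice : PySem.List.slice (pre ++ r :: rs) none (some (pre.length : Int)) = pre := by
      rw [PySem.List.slice_to_natCast]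
      exact List.take_left
    rw [PySem.List.enumerate_cons, List.filter_cons]
    have hre : pre ++ r :: rs = (pre ++ [r]) ++ rs := by simp
    have hcast : (pre.length : Int) + 1 = ((pre ++ [r]).length : Int) := by
      simp
    by_cases h : pvRowKey r ∈ pre.map pvRowKey
    · have hcond : ((PySem.List.slice (pre ++ r :: rs) none (some (pre.length : Int))).all
          (fun q => pvRowKey q != pvRowKey r)) = false := by
        rw [hslice]
        simp only [List.all_eq_false, bne_iff_ne, ne_eq, not_not]
        simpa using List.mem_map.mp h
      rw [if_neg (by rw [hcond]; exact Bool.false_ne_true)]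
      rw [hre, hcast, ih (pre ++ [r])]
      rw [pvDD, if_pos h]
      refine pvDD_congr _ _ rs fun q => ?_
      simp only [List.map_append, List.map_cons, List.map_nil, List.mem_append,
        List.mem_cons, List.not_mem_nil, or_false]
      constructor
      · rintro (hq | rfl)
        · exact hq
        · exact h
      · exact Or.inl
    · have hcond : ((PySem.List.slice (pre ++ r :: rs) none (some (pre.length : Int))).all
          (fun q => pvRowKey q != pvRowKey r)) = true := by
        rw [hslice, List.all_eq_true]
        intro q hq
        simp only [bne_iff_ne, ne_eq]
        intro he
        exact h (List.mem_map.mpr ⟨q, hq, he⟩)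
      rw [if_pos hcond, List.map_cons]
      rw [hre, hcast, ih (pre ++ [r])]
      rw [pvDD, if_neg h]
      simp

-- ===== VERDICT (by name: the statement is the Claim_ definition above) =====
theorem dedup_rows_spec : Claim_equal_dedup_rows := by
  intro rows _ _
  unfold Spec_dedup_rows
  simp only [dedup_rows, dedup_rows_alt]
  rw [pvA_loop]
  have hB := pvB_gen rows []
  simp only [List.length_nil, Int.natCast_zero, List.nil_append, List.map_nil] at hB
  rw [hB]
  simp only [List.nil_append]
  exact pvMain rows []
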